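-- pv_equiv track=rewrite | github.com/JohnToro-CZAF/CP | CodeForce/Contest/742_div2/PracticalExercise4.py | generate
-- ===== SOURCE A (Python) =====
-- b = (0, 0, 0)
--
-- def generate(color):
--     image_pixels = [b, b, b, b, b, b, b, b,
--                      b, b, b, 'x', b, b, b, b,
--                      b, b, 'x', 'x', 'x', b, b, b,
--                      b, 'x', b, 'x', b, 'x', b, b,
--                      b, b, b, 'x', b, b, b, b,
--                      b, b, b, 'x', b, b, b, b,
--                      b, b, b, 'x', b, b, b, b,
--                      b, b, b, b, b, b, b, b]
--
--     for i in range(len(image_pixels)):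
--         if image_pixels[i] == 'x':
--             image_pixels[i] = color
--     return image_pixels
-- ===== SOURCE B (Python) =====
-- b = (0, 0, 0)
--
-- def generate(color):
--     # Draw the sprite as geometric strokes on an 8x8 grid:
--     # a vertical shaft in column 3 (rows 1..6), a horizontal bar in row 2
--     # (cols 2..4), and two wing pixels at (3,1) and (3,5).
--     pts = {(r, 3) for r in range(1, 7)}
--     pts |= {(2, c) for c in range(2, 5)}
--     pts |= {(3, 1), (3, 5)}
--     return [color if (r, c) in pts else b
--             for r in range(8) for c in range(8)]
-- ===== Notes on version B (the rewrite author's own statement) =====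
-- stated objective: alternative
-- what changed: B discards the 64-cell literal template: it constructs the sprite geometrically as a set of (row,col) coordinates from three strokes (vertical shaft, horizontal bar, two wing dots) and renders by a nested row/column traversal with set membership, instead of A's flat list with marker cells mutated in an index loop.
import Mathlib
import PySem

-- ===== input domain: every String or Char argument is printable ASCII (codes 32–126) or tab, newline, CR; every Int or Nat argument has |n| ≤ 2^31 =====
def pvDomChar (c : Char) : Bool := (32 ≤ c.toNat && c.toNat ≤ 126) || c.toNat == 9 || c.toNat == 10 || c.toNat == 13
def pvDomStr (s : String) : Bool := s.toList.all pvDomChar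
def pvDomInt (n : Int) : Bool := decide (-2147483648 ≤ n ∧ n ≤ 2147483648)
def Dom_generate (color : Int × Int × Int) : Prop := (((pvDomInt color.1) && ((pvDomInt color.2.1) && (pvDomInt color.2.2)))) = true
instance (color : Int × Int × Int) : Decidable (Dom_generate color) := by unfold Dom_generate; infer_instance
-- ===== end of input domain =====

-- B draws the sprite geometrically (coordinate set built from three strokes,
-- rendered by a nested row/column traversal) instead of mutating a 64-cell
-- literal template by index (objective: alternative).


-- ===== PORT A =====
-- A's list mixes tuples and the string 'x'; ported as Option (Int × Int × Int):
-- none stands for the placeholder 'x', some t for a tuple entry.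
def pvB : Option (Int × Int × Int) := some (0, 0, 0)

def pvPixels0 : List (Option (Int × Int × Int)) :=
  [pvB, pvB, pvB, pvB, pvB, pvB, pvB, pvB,
   pvB, pvB, pvB, none, pvB, pvB, pvB, pvB,
   pvB, pvB, none, none, none, pvB, pvB, pvB,
   pvB, none, pvB, none, pvB, none, pvB, pvB,
   pvB, pvB, pvB, none, pvB, pvB, pvB, pvB,
   pvB, pvB, pvB, none, pvB, pvB, pvB, pvB,
   pvB, pvB, pvB, none, pvB, pvB, pvB, pvB,
   pvB, pvB, pvB, pvB, pvB, pvB, pvB, pvB]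

def generate (color : Int × Int × Int) : List (Int × Int × Int) :=
  -- for i in range(len(image_pixels)): if image_pixels[i] == 'x': image_pixels[i] = color
  let image_pixels :=
    (PySem.List.pyRange 0 (Int.ofNat pvPixels0.length) 1).foldl
      (fun l i =>
        if PySem.List.pyGet? l i = some none then l.set i.toNat (some color) else l)
      pvPixels0
  -- after the loop every entry is a tuple; extract it (default unreachable)
  image_pixels.map (fun p => p.getD (0, 0, 0))

-- ===== PORT B =====
-- pts = {(r,3) for r in range(1,7)} | {(2,c) for c in range(2,5)} | {(3,1),(3,5)}
def pvPts : PySem.Set (Int × Int) :=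
  let s1 := PySem.Set.ofList ((PySem.List.pyRange 1 7 1).map (fun r => (r, (3 : Int))))
  let s2 := PySem.Set.union s1 ((PySem.List.pyRange 2 5 1).map (fun c => ((2 : Int), c)))
  PySem.Set.union s2 [((3 : Int), (1 : Int)), (3, 5)]

def generate_alt (color : Int × Int × Int) : List (Int × Int × Int) :=
  (PySem.List.pyRange 0 8 1).flatMap (fun r =>
    (PySem.List.pyRange 0 8 1).map (fun c =>
      if PySem.Set.contains pvPts (r, c) then color else (0, 0, 0)))

-- ===== PRECONDITION & SPEC =====
def Spec_generate (color : Int × Int × Int) (out : List (Int × Int × Int)) : Prop := out = generate_alt color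
instance (color : Int × Int × Int) (out : List (Int × Int × Int)) : Decidable (Spec_generate color out) := by unfold Spec_generate; infer_instance

-- ===== CLAIM (what is proved, stated in full; the proofs are below) =====
def Claim_equal_generate : Prop := ∀ (color : Int × Int × Int), Dom_generate color → Spec_generate color (generate color)

-- ===== LEMMAS AND PROOFS =====
-- helper: setting at the junction of an append
lemma pv_set_append_len {α : Type} (pre : List α) (x a : α) (suff : List α) :
    (pre ++ x :: suff).set pre.length a = pre ++ a :: suff := by
  induction pre with
  | nil => simp
  | cons y pre ih => simp [ih]

-- the mutation loop of A rewrites every 'none' cell to 'some c', pointwise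
lemma pv_loop_eq {γ : Type} [DecidableEq γ] (c : γ) :
    ∀ (suff pre : List (Option γ)),
    (PySem.List.pyRange (pre.length : Int) ((pre.length : Int) + suff.length) 1).foldl
      (fun l i => if PySem.List.pyGet? l i = some none then l.set i.toNat (some c) else l)
      (pre ++ suff)
    = pre ++ suff.map (fun p => if p = none then some c else p) := by
  intro suff
  induction suff with
  | nil =>
    intro pre
    rw [PySem.List.pyRange_one_eq_nil (by simp)]
    simp
  | cons x suff ih =>
    intro pre
    rw [PySem.List.pyRange_one_cons (by simp only [List.length_cons]; push_cast; omega)]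
    simp only [List.foldl_cons, PySem.List.pyGet?_append_length]
    by_cases hx : x = none
    · subst hx
      rw [if_pos rfl]
      rw [Int.toNat_natCast, pv_set_append_len]
      have h := ih (pre ++ [some c])
      simp only [List.append_assoc, List.singleton_append, List.length_append,
        List.length_cons, List.map_cons, if_true] at h ⊢
      push_cast at h ⊢
      ring_nf at h ⊢
      exact h
    · rw [if_neg (by simpa using hx)]
      have h := ih (pre ++ [x])
      simp only [List.append_assoc, List.singleton_append, List.length_append,
        List.length_cons, List.map_cons, if_neg hx] at h ⊢
      push_cast at h ⊢
      ring_nf at h ⊢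
      exact h

-- pvPts evaluates to this literal coordinate list
lemma pv_pts_eval : pvPts =
    [((1:Int),(3:Int)), (2,3), (3,3), (4,3), (5,3), (6,3), (2,2), (2,4), (3,1), (3,5)] := by
  decide

-- ===== VERDICT (by name: the statement is the Claim_ definition above) =====
set_option maxRecDepth 100000 in
theorem generate_spec : Claim_equal_generate := by
  intro color _
  show generate color = generate_alt color
  unfold generate generate_alt
  have h := pv_loop_eq color pvPixels0 []
  simp only [List.nil_append, List.length_nil, Nat.cast_zero, zero_add] at h
  have hof : Int.ofNat pvPixels0.length = ((pvPixels0.length : Nat) : Int) := rfl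
  rw [hof, h, pv_pts_eval]
  have hr : PySem.List.pyRange 0 8 1 = [(0:Int),1,2,3,4,5,6,7] := by decide
  rw [hr]
  simp only [pvPixels0, pvB, List.map_cons, List.map_nil, List.flatMap_cons,
    List.flatMap_nil, List.append_nil]
  simp [PySem.Set.contains]
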